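-- pv_equiv track=rewrite | github.com/fatihcelikbas/cantstop_agent | agent/cantstop_env.py | process_action
-- ===== SOURCE A (Python) =====
-- def process_action(action):
--     stop = 0
--     if action > 77:
--         stop = 1
--         action -= 78
--
--     move = [0 for i in range(13)]
--     prev = 0
--     curr = 12
--     diff = 11
--     level = 0
--     for i in range(11):
--         if action < curr:
--             break
--         else:
--             level += 1
--             prev = curr
--             curr += diff
--             diff -= 1
--     if level == 0:
--         move[action+1] = 2
--     else:
--         move[level] = 1
--         action -= (prev - 1)
--         move[level + action] = 1
--
--     return (move, stop)
-- ===== SOURCE B (Python) =====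
-- import bisect
--
-- _T = [12, 23, 33, 42, 50, 57, 63, 68, 72, 75, 77]
--
-- def process_action(action):
--     stop = 0
--     if action > 77:
--         stop = 1
--         action -= 78
--     move = [0] * 13
--     level = bisect.bisect_right(_T, action)
--     if level == 0:
--         move[action + 1] = 2
--     else:
--         move[level] = 1
--         action -= _T[level - 1] - 1
--         move[level + action] = 1
--     return (move, stop)
-- ===== Notes on version B (the rewrite author's own statement) =====
-- stated objective: simpler
-- what changed: Replaces the accumulating loop over triangular-number increments (prev/curr/diff/level state) by a precomputed threshold table and a bisect_right binary search to find the level.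
-- outside the precondition, e.g. on process_action(-15): A raises IndexError, B raises IndexError; on process_action(156): A raises IndexError, B raises IndexError
import Mathlib
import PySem

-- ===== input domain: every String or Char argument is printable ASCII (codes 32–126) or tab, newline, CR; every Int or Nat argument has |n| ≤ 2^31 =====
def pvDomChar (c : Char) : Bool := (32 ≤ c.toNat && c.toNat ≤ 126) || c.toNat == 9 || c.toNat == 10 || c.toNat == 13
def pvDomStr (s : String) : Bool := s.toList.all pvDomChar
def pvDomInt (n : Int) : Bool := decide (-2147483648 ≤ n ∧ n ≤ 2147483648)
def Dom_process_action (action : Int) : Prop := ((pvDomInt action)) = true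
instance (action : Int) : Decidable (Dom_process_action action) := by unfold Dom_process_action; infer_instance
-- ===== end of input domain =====

-- B replaces A's triangular-number accumulation loop by a precomputed
-- threshold table and a binary search (bisect.bisect_right); objective: simpler.

-- ===== PORT A =====
-- the bounded 'for i in range(...): if action < curr: break else: …' loop; returns (prev, level)
def paLoop : Nat → Int → Int → Int → Int → Int → Int × Int
  | 0, _, prev, _, _, level => (prev, level)
  | n + 1, action, prev, curr, diff, level =>
    if action < curr then (prev, level)
    else paLoop n action curr (curr + diff) (diff - 1) (level + 1)

def process_action (action : Int) : List Int × Int :=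
  let stop : Int := if action > 77 then 1 else 0
  let action := if action > 77 then action - 78 else action
  let move : List Int := List.replicate 13 0
  let pl := paLoop 11 action 0 12 11 0
  let prev := pl.1
  let level := pl.2
  let move :=
    if level = 0 then PySem.List.pySetD move (action + 1) 2
    else
      let move := PySem.List.pySetD move level 1
      let action := action - (prev - 1)
      PySem.List.pySetD move (level + action) 1
  (move, stop)

-- ===== PORT B =====
-- port of bisect.bisect_right on a list of ints (fuel-guarded binary search)
def bisectRightAux : Nat → List Int → Int → Nat → Nat → Nat
  | 0, _, _, lo, _ => lo
  | fuel + 1, xs, x, lo, hi =>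
    if lo < hi then
      let mid := (lo + hi) / 2
      if x < xs.getD mid 0 then bisectRightAux fuel xs x lo mid
      else bisectRightAux fuel xs x (mid + 1) hi
    else lo

def bisectRight (xs : List Int) (x : Int) : Nat :=
  bisectRightAux (xs.length + 1) xs x 0 xs.length

def pvT : List Int := [12, 23, 33, 42, 50, 57, 63, 68, 72, 75, 77]

def process_action_alt (action : Int) : List Int × Int :=
  let stop : Int := if action > 77 then 1 else 0
  let action := if action > 77 then action - 78 else action
  let move : List Int := List.replicate 13 0
  let level : Int := (bisectRight pvT action : Nat)
  let move :=
    if level = 0 then PySem.List.pySetD move (action + 1) 2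
    else
      let move := PySem.List.pySetD move level 1
      let action := action - (pvT.getD (level - 1).toNat 0 - 1)
      PySem.List.pySetD move (level + action) 1
  (move, stop)

-- ===== PRECONDITION & SPEC =====
-- Pre_ excludes exactly the inputs on which A raises IndexError:
-- action ≤ -15 (write index below -13) and action ≥ 156 (write index above 12).
def Pre_process_action (action : Int) : Prop := -14 ≤ action ∧ action ≤ 155
instance (action : Int) : Decidable (Pre_process_action action) := by unfold Pre_process_action; infer_instance
def pvWitness_process_action : Int := (5)

def Spec_process_action (action : Int) (out : List Int × Int) : Prop := out = process_action_alt action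
instance (action : Int) (out : List Int × Int) : Decidable (Spec_process_action action out) := by unfold Spec_process_action; infer_instance

-- ===== CLAIM (what is proved, stated in full; the proofs are below) =====
def Claim_equal_process_action : Prop := ∀ (action : Int), Dom_process_action action → Pre_process_action action → Spec_process_action action (process_action action)

-- ===== LEMMAS AND PROOFS =====
set_option maxRecDepth 4096 in
theorem pv_all_icc : ∀ a ∈ Finset.Icc (-14 : Int) 155, process_action a = process_action_alt a := by
  decide

-- ===== VERDICT (by name: the statement is the Claim_ definition above) =====
theorem process_action_spec : Claim_equal_process_action := by
  intro action _ hpre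
  unfold Spec_process_action
  exact pv_all_icc action (Finset.mem_Icc.mpr ⟨hpre.1, hpre.2⟩)
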